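-- pv_equiv track=rewrite | github.com/dogunyoye/advent-of-code-2016 | day11/day11.py | __floor_plan
-- ===== SOURCE A (Python) =====
-- def __floor_plan(floors) -> str:
--     floor_plan = {}
--     for k, v in floors.items():
--         floor_plan[k] = []
--         for i in v:
--             if i.endswith("G"):
--                 floor_plan[k].append("G")
--             elif i.endswith("M"):
--                 floor_plan[k].append("M")
--         floor_plan[k].sort()
--     return str(floor_plan)
-- ===== SOURCE B (Python) =====
-- def __floor_plan(floors) -> str:
--     floor_plan = {}
--     for k, v in floors.items():
--         g = sum(1 for i in v if i.endswith("G"))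
--         m = sum(1 for i in v if i.endswith("M"))
--         floor_plan[k] = ["G"] * g + ["M"] * m
--     return str(floor_plan)
-- ===== Notes on version B (the rewrite author's own statement) =====
-- stated objective: simpler
-- what changed: Instead of appending a tag per item and then sorting each floor's list, B counts the items ending in G and in M and builds each floor's already-sorted list directly by replication, so no sort call is needed.
import Mathlib
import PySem

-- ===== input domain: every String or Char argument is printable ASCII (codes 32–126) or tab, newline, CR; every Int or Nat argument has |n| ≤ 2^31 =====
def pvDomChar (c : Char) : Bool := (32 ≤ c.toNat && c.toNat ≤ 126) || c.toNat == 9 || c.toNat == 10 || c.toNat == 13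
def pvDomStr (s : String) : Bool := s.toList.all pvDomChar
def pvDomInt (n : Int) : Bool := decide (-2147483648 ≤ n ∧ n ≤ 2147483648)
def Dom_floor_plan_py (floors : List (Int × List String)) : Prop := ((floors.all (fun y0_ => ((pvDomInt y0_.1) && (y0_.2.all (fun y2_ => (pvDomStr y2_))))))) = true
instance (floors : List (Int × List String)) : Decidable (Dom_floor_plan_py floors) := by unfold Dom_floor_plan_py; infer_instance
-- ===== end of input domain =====

-- B replaces A's append-then-sort per floor by counting the G- and M-suffixed items and
-- building each floor's already-sorted list directly by replication; objective: simpler (no sort).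
-- str(dict) is ported by hand below (pyReprDict): exact for int keys and lists of quote-free
-- values like "G"/"M", which is all either program ever stores.

-- ===== PORT A =====
-- hand port of str(d) for d : dict[int, list[str]] with quote-free string values (exact here)
def pyReprStrList (l : List String) : String :=
  PySem.Str.join "" ["[", PySem.Str.join ", " (l.map (fun s => PySem.Str.join "" ["'", s, "'"])), "]"]

def pyReprDict (d : PySem.Dict Int (List String)) : String :=
  PySem.Str.join "" ["{", PySem.Str.join ", " (d.items.map (fun kv => PySem.Str.join "" [PySem.Int.toStr kv.1, ": ", pyReprStrList kv.2])), "}"]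

def floor_plan_py (floors : List (Int × List String)) : String :=
  let fd := PySem.Dict.ofList floors
  let plan := fd.items.foldl (fun d kv =>
    let d1 := d.insert kv.1 ([] : List String)
    let d2 := kv.2.foldl (fun d i =>
      if PySem.Str.endswith i "G" then d.modify kv.1 [] (· ++ ["G"])
      else if PySem.Str.endswith i "M" then d.modify kv.1 [] (· ++ ["M"])
      else d) d1
    d2.modify kv.1 [] (fun l => PySem.List.sorted l (fun x => x))) PySem.Dict.empty
  pyReprDict plan

-- ===== PORT B =====
def floor_plan_py_alt (floors : List (Int × List String)) : String :=
  let fd := PySem.Dict.ofList floors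
  let plan := fd.items.foldl (fun d kv =>
    let g := (kv.2.filter (fun i => PySem.Str.endswith i "G")).length
    let m := (kv.2.filter (fun i => PySem.Str.endswith i "M")).length
    d.insert kv.1 (List.replicate g "G" ++ List.replicate m "M")) PySem.Dict.empty
  pyReprDict plan

-- ===== PRECONDITION & SPEC =====
def Spec_floor_plan_py (floors : List (Int × List String)) (out : String) : Prop := out = floor_plan_py_alt floors
instance (floors : List (Int × List String)) (out : String) : Decidable (Spec_floor_plan_py floors out) := by unfold Spec_floor_plan_py; infer_instance

-- ===== CLAIM (what is proved, stated in full; the proofs are below) =====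
def Claim_equal_floor_plan_py : Prop := ∀ (floors : List (Int × List String)), Dom_floor_plan_py floors → Spec_floor_plan_py floors (floor_plan_py floors)

-- ===== LEMMAS AND PROOFS =====

-- A's inner append loop, threaded through the dict entry at key k
theorem inner_loop_insert (k : Int) (v : List String) (d : PySem.Dict Int (List String)) (l : List String) :
    v.foldl (fun d i =>
      if PySem.Str.endswith i "G" then d.modify k [] (· ++ ["G"])
      else if PySem.Str.endswith i "M" then d.modify k [] (· ++ ["M"])
      else d) (d.insert k l)
    = d.insert k (l ++ v.filterMap (fun i =>
        if PySem.Str.endswith i "G" then some "G"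
        else if PySem.Str.endswith i "M" then some "M" else none)) := by
  induction v generalizing l with
  | nil => simp
  | cons i v ih =>
    simp only [List.foldl_cons, List.filterMap_cons]
    by_cases hg : PySem.Str.endswith i "G" = true
    · rw [if_pos hg]
      have hstep : (d.insert k l).modify k [] (· ++ ["G"]) = d.insert k (l ++ ["G"]) := by
        simp [PySem.Dict.modify, PySem.Dict.getD_insert_self, PySem.Dict.insert_insert_self]
      rw [hstep, ih (l ++ ["G"])]
      have hg' : PySem.Chars.endswith i.toList ['G'] = true := hg
      simp [hg']
    · rw [if_neg hg]
      by_cases hm : PySem.Str.endswith i "M" = true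
      · rw [if_pos hm]
        have hstep : (d.insert k l).modify k [] (· ++ ["M"]) = d.insert k (l ++ ["M"]) := by
          simp [PySem.Dict.modify, PySem.Dict.getD_insert_self, PySem.Dict.insert_insert_self]
        rw [hstep, ih (l ++ ["M"])]
        have hg' : ¬ PySem.Chars.endswith i.toList ['G'] = true := hg
        have hm' : PySem.Chars.endswith i.toList ['M'] = true := hm
        simp [hg', hm']
      · rw [if_neg hm]
        rw [ih l]
        have hg' : ¬ PySem.Chars.endswith i.toList ['G'] = true := hg
        have hm' : ¬ PySem.Chars.endswith i.toList ['M'] = true := hm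
        simp [hg', hm']

-- a list of "G"/"M" strings is a permutation of its G-block followed by its M-block
theorem perm_blocks (l : List String) (h : ∀ x ∈ l, x = "G" ∨ x = "M") :
    l.Perm (List.replicate (l.count "G") "G" ++ List.replicate (l.count "M") "M") := by
  induction l with
  | nil => simp
  | cons x l ih =>
    have ih' := ih (fun y hy => h y (List.mem_cons_of_mem _ hy))
    rcases h x (List.mem_cons_self) with hx | hx <;> subst hx
    · rw [List.count_cons_self, List.count_cons_of_ne (by decide : ("G" : String) ≠ "M"),
        List.replicate_succ]
      simpa using ih'.cons "G"
    · rw [List.count_cons_self, List.count_cons_of_ne (by decide : ("M" : String) ≠ "G"),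
        List.replicate_succ]
      exact (ih'.cons "M").trans List.perm_middle.symm

-- the sorted order of a G/M-only list is its G-block then its M-block
theorem sorted_blocks (l : List String) (h : ∀ x ∈ l, x = "G" ∨ x = "M") :
    PySem.List.sorted l (fun x => x)
      = List.replicate (l.count "G") "G" ++ List.replicate (l.count "M") "M" := by
  apply PySem.List.sorted_id_eq_of_perm_of_pairwise
  · exact (perm_blocks l h).symm
  · have hGM : ("G" : String) ≤ "M" := by rw [String.le_iff_toList_le]; decide
    apply List.pairwise_append.2
    refine ⟨List.pairwise_replicate.2 (Or.inr le_rfl),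
      List.pairwise_replicate.2 (Or.inr le_rfl), ?_⟩
    intro a ha b hb
    rw [List.eq_of_mem_replicate ha, List.eq_of_mem_replicate hb]
    exact hGM

-- a string cannot end with both "G" and "M"
theorem not_endswith_both (i : String) (hg : PySem.Str.endswith i "G" = true)
    (hm : PySem.Str.endswith i "M" = true) : False := by
  have e1 : ['G'] <:+ i.toList := (PySem.Chars.endswith_iff i.toList ['G']).1 hg
  have e2 : ['M'] <:+ i.toList := (PySem.Chars.endswith_iff i.toList ['M']).1 hm
  obtain ⟨a, ha⟩ := e1
  obtain ⟨b, hb⟩ := e2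
  have h1 : i.toList.getLast? = some 'G' := by rw [← ha]; simp
  have h2 : i.toList.getLast? = some 'M' := by rw [← hb]; simp
  rw [h1] at h2
  simp at h2

theorem count_filterMap_tags (v : List String) :
    ((v.filterMap (fun i =>
        if PySem.Str.endswith i "G" then some "G"
        else if PySem.Str.endswith i "M" then some "M" else none)).count "G"
      = (v.filter (fun i => PySem.Str.endswith i "G")).length)
    ∧ ((v.filterMap (fun i =>
        if PySem.Str.endswith i "G" then some "G"
        else if PySem.Str.endswith i "M" then some "M" else none)).count "M"
      = (v.filter (fun i => PySem.Str.endswith i "M")).length) := by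
  induction v with
  | nil => simp
  | cons i v ih =>
    simp only [PySem.Str.endswith, show "G".toList = ['G'] from rfl, show "M".toList = ['M'] from rfl] at ih
    by_cases hg : PySem.Str.endswith i "G" = true
    · by_cases hm : PySem.Str.endswith i "M" = true
      · exact absurd (not_endswith_both i hg hm) (by simp)
      · have hg' : PySem.Chars.endswith i.toList ['G'] = true := hg
        have hm' : PySem.Chars.endswith i.toList ['M'] ≠ true := hm
        simp [hg', hm']
        exact ih
    · by_cases hm : PySem.Str.endswith i "M" = true
      · have hg' : PySem.Chars.endswith i.toList ['G'] ≠ true := hg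
        have hm' : PySem.Chars.endswith i.toList ['M'] = true := hm
        simp [hg', hm']
        exact ih
      · have hg' : PySem.Chars.endswith i.toList ['G'] ≠ true := hg
        have hm' : PySem.Chars.endswith i.toList ['M'] ≠ true := hm
        simp [hg', hm']
        exact ih

theorem step_eq (d : PySem.Dict Int (List String)) (kv : Int × List String) :
    (let d1 := d.insert kv.1 ([] : List String)
     let d2 := kv.2.foldl (fun d i =>
       if PySem.Str.endswith i "G" then d.modify kv.1 [] (· ++ ["G"])
       else if PySem.Str.endswith i "M" then d.modify kv.1 [] (· ++ ["M"])
       else d) d1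
     d2.modify kv.1 [] (fun l => PySem.List.sorted l (fun x => x)))
    = d.insert kv.1 (List.replicate (kv.2.filter (fun i => PySem.Str.endswith i "G")).length "G"
        ++ List.replicate (kv.2.filter (fun i => PySem.Str.endswith i "M")).length "M") := by
  obtain ⟨k, v⟩ := kv
  have hmem : ∀ x ∈ v.filterMap (fun i =>
      if PySem.Str.endswith i "G" then some "G"
      else if PySem.Str.endswith i "M" then some "M" else none), x = "G" ∨ x = "M" := by
    intro x hx
    rcases List.mem_filterMap.1 hx with ⟨i, _, hi⟩
    by_cases hg : PySem.Str.endswith i "G" = true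
    · rw [if_pos hg] at hi
      injection hi with h
      exact Or.inl h.symm
    · rw [if_neg hg] at hi
      by_cases hm : PySem.Str.endswith i "M" = true
      · rw [if_pos hm] at hi
        injection hi with h
        exact Or.inr h.symm
      · rw [if_neg hm] at hi
        exact absurd hi (by simp)
  simp only [inner_loop_insert k v d [], List.nil_append]
  simp only [PySem.Dict.modify]
  rw [PySem.Dict.getD_insert_self, PySem.Dict.insert_insert_self,
    sorted_blocks _ hmem, (count_filterMap_tags v).1, (count_filterMap_tags v).2]

theorem foldl_step (l : List (Int × List String)) (d : PySem.Dict Int (List String)) :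
    l.foldl (fun d kv =>
      let d1 := d.insert kv.1 ([] : List String)
      let d2 := kv.2.foldl (fun d i =>
        if PySem.Str.endswith i "G" then d.modify kv.1 [] (· ++ ["G"])
        else if PySem.Str.endswith i "M" then d.modify kv.1 [] (· ++ ["M"])
        else d) d1
      d2.modify kv.1 [] (fun l => PySem.List.sorted l (fun x => x))) d
    = l.foldl (fun d kv =>
      let g := (kv.2.filter (fun i => PySem.Str.endswith i "G")).length
      let m := (kv.2.filter (fun i => PySem.Str.endswith i "M")).length
      d.insert kv.1 (List.replicate g "G" ++ List.replicate m "M")) d := by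
  induction l generalizing d with
  | nil => rfl
  | cons kv l ih =>
    simp only [List.foldl_cons]
    rw [step_eq d kv]
    exact ih _

-- ===== VERDICT (by name: the statement is the Claim_ definition above) =====
theorem floor_plan_py_spec : Claim_equal_floor_plan_py := by
  intro floors _
  unfold Spec_floor_plan_py floor_plan_py floor_plan_py_alt
  exact congrArg pyReprDict (foldl_step _ _)
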